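-- pv_equiv track=rewrite | github.com/Intradyne/FormicOS | src/agents.py | _is_dynamic_mcp_management_tool
-- ===== SOURCE A (Python) =====
-- _DYNAMIC_MCP_MANAGEMENT_TOOL_NAMES = (
--     "mcp-add", "mcp_add",
--     "mcp-remove", "mcp_remove",
--     "mcp-config-set", "mcp_config_set",
--     "mcp-exec", "mcp_exec",
-- )
--
-- def _is_dynamic_mcp_management_tool(tool_name: str) -> bool:
--     name = str(tool_name or "").lower()
--     if not name:
--         return False
--     for base in _DYNAMIC_MCP_MANAGEMENT_TOOL_NAMES:
--         if (
--             name == base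
--             or name.endswith("__" + base)
--             or name.endswith(":" + base)
--             or name.endswith("/" + base)
--             or name.endswith("." + base)
--         ):
--             return True
--     return False
-- ===== SOURCE B (Python) =====
-- _MCP_BASE_NAMES = {
--     "mcp-add", "mcp_add",
--     "mcp-remove", "mcp_remove",
--     "mcp-config-set", "mcp_config_set",
--     "mcp-exec", "mcp_exec",
-- }
--
-- def _is_dynamic_mcp_management_tool(tool_name: str) -> bool:
--     name = str(tool_name or "").lower()
--     if not name:
--         return False
--     if name in _MCP_BASE_NAMES:
--         return True
--     for sep in ("__", ":", "/", "."):
--         if sep in name and name.rsplit(sep, 1)[1] in _MCP_BASE_NAMES: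
--             return True
--     return False
-- ===== Notes on version B (the rewrite author's own statement) =====
-- stated objective: alternative
-- what changed: Replaces the 8-base loop with four endswith checks each by a set of base names plus, per separator, extraction of the suffix after its last occurrence (rsplit) and one set-membership test.
import Mathlib
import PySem

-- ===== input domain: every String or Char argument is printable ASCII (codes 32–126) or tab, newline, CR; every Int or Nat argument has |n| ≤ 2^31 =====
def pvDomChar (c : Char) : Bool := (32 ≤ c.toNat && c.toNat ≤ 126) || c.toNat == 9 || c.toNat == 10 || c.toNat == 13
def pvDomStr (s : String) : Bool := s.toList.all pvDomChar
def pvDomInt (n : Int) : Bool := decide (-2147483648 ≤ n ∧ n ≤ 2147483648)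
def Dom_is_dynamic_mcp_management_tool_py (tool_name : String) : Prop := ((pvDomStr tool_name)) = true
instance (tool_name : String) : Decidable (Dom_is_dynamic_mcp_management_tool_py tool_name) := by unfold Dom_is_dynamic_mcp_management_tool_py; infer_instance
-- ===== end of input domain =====

-- B replaces A's 8-base × 4-prefixed endswith scan by extracting, per separator, the
-- suffix after its last occurrence (rsplit) and testing it against a set of base names
-- (objective: alternative decomposition, same cost class).

-- ===== PORT A =====
-- the tuple _DYNAMIC_MCP_MANAGEMENT_TOOL_NAMES, as lists of chars
def pvBases : List (List Char) :=
  ["mcp-add".toList, "mcp_add".toList,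
   "mcp-remove".toList, "mcp_remove".toList,
   "mcp-config-set".toList, "mcp_config_set".toList,
   "mcp-exec".toList, "mcp_exec".toList]

-- the for-loop over the bases: early `return True` transliterated as `||`
def pvLoopA (name : List Char) : List (List Char) → Bool
  | [] => false
  | b :: rest =>
    (name == b
      || PySem.Chars.endswith name (['_', '_'] ++ b)
      || PySem.Chars.endswith name ([':'] ++ b)
      || PySem.Chars.endswith name (['/'] ++ b)
      || PySem.Chars.endswith name (['.'] ++ b))
    || pvLoopA name rest

def is_dynamic_mcp_management_tool_py (tool_name : String) : Bool :=
  -- name = str(tool_name or "").lower(); `tool_name or ""` on a str is the string itself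
  let name := PySem.Chars.lower (if tool_name == "" then "" else tool_name).toList
  if name == [] then false
  else pvLoopA name pvBases

-- ===== PORT B =====
-- hand port of `name.rsplit(sep, 1)[1]` guarded by `sep in name` (exact for nonempty
-- sep: some (suffix after the LAST occurrence of sep), none when sep not in name)
def pvLastTail (sep : List Char) : List Char → Option (List Char)
  | [] => none
  | c :: rest =>
    match pvLastTail sep rest with
    | some t => some t
    | none => if sep.isPrefixOf (c :: rest) then some ((c :: rest).drop sep.length) else none

def pvSeps : List (List Char) := [['_', '_'], [':'], ['/'], ['.']]

-- loop over the separators: `if sep in name and name.rsplit(sep, 1)[1] in S: return True`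
def pvLoopB (name : List Char) : List (List Char) → Bool
  | [] => false
  | sep :: rest =>
    (match pvLastTail sep name with
     | some t => pvBases.contains t
     | none => false)
    || pvLoopB name rest

def is_dynamic_mcp_management_tool_py_alt (tool_name : String) : Bool :=
  let name := PySem.Chars.lower (if tool_name == "" then "" else tool_name).toList
  if name == [] then false
  else if pvBases.contains name then true
  else pvLoopB name pvSeps

-- ===== PRECONDITION & SPEC =====
def Spec_is_dynamic_mcp_management_tool_py (tool_name : String) (out : Bool) : Prop := out = is_dynamic_mcp_management_tool_py_alt tool_name
instance (tool_name : String) (out : Bool) : Decidable (Spec_is_dynamic_mcp_management_tool_py tool_name out) := by unfold Spec_is_dynamic_mcp_management_tool_py; infer_instance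

-- ===== CLAIM (what is proved, stated in full; the proofs are below) =====
def Claim_equal_is_dynamic_mcp_management_tool_py : Prop := ∀ (tool_name : String), Dom_is_dynamic_mcp_management_tool_py tool_name → Spec_is_dynamic_mcp_management_tool_py tool_name (is_dynamic_mcp_management_tool_py tool_name)

-- ===== LEMMAS AND PROOFS =====

-- pvLastTail returns the tail of a real occurrence of sep
theorem pvLastTail_suffix (sep : List Char) (s t : List Char)
    (h : pvLastTail sep s = some t) : sep ++ t <:+ s := by
  induction s with
  | nil => simp [pvLastTail] at h
  | cons c rest ih =>
    rw [pvLastTail] at h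
    cases hrec : pvLastTail sep rest with
    | some t' =>
      simp only [hrec] at h
      cases h
      exact (ih hrec).trans (List.suffix_cons c rest)
    | none =>
      simp only [hrec] at h
      by_cases hpre : sep.isPrefixOf (c :: rest)
      · rw [if_pos hpre] at h
        injection h with h
        subst h
        have hp : sep <+: (c :: rest) := List.isPrefixOf_iff_prefix.mp hpre
        have hcat : sep ++ (c :: rest).drop sep.length = c :: rest := by
          obtain ⟨u, hu⟩ := hp
          conv_lhs => rw [← hu, List.drop_left]
          exact hu
        rw [hcat]
      · rw [if_neg hpre] at h
        exact absurd h (by simp)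

-- if sep does not reoccur inside (sep ++ b).drop 1, the tail after the LAST occurrence
-- of sep in any string ending with sep ++ b is exactly b
theorem pvLastTail_of_suffix (sep b : List Char) (hsep : sep ≠ [])
    (hC : ¬ sep <:+: (sep ++ b).drop 1) :
    ∀ s : List Char, (sep ++ b) <:+ s → pvLastTail sep s = some b := by
  intro s
  induction s with
  | nil =>
    intro h
    have := List.eq_nil_of_suffix_nil h
    simp [hsep] at this
  | cons c rest ih =>
    intro h
    rcases List.suffix_cons_iff.mp h with heq | hsuf
    · -- the occurrence is at the head: c :: rest = sep ++ b
      rw [pvLastTail]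
      cases hrec : pvLastTail sep rest with
      | some t' =>
        exfalso
        have h1 : sep ++ t' <:+ rest := pvLastTail_suffix sep rest t' hrec
        have h2 : sep <:+: rest := (List.prefix_append sep t').isInfix.trans h1.isInfix
        have hr : rest = (sep ++ b).drop 1 := by
          have := congrArg (List.drop 1) heq
          simpa using this.symm
        rw [hr] at h2
        exact hC h2
      | none =>
        have hp : sep <+: (c :: rest) := by
          rw [← heq]; exact List.prefix_append sep b
        simp only [List.isPrefixOf_iff_prefix.mpr hp, if_true]
        have hd : (c :: rest).drop sep.length = b := by
          rw [← heq, List.drop_left]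
        rw [hd]
    · rw [pvLastTail, ih hsuf]

-- per-(sep, base) atom: endswith ↔ the rsplit tail equals that base
theorem pvAtom (sep b : List Char) (hsep : sep ≠ [])
    (hC : ¬ sep <:+: (sep ++ b).drop 1) (n : List Char) :
    PySem.Chars.endswith n (sep ++ b) = (pvLastTail sep n == some b) := by
  apply Bool.eq_iff_iff.mpr
  rw [PySem.Chars.endswith_iff, beq_iff_eq]
  exact ⟨pvLastTail_of_suffix sep b hsep hC n, pvLastTail_suffix sep n b⟩

theorem pvAnyCongr {α : Type} (l : List α) (p q : α → Bool)
    (h : ∀ x ∈ l, p x = q x) : l.any p = l.any q := by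
  induction l with
  | nil => rfl
  | cons x xs ih => simp_all [List.any_cons]

theorem pvAnyOr {α : Type} (l : List α) (p q : α → Bool) :
    l.any (fun x => p x || q x) = (l.any p || l.any q) := by
  apply Bool.eq_iff_iff.mpr
  simp only [List.any_eq_true, Bool.or_eq_true]
  constructor
  · rintro ⟨x, hx, h | h⟩
    · exact Or.inl ⟨x, hx, h⟩
    · exact Or.inr ⟨x, hx, h⟩
  · rintro (⟨x, hx, h⟩ | ⟨x, hx, h⟩)
    · exact ⟨x, hx, Or.inl h⟩
    · exact ⟨x, hx, Or.inr h⟩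

-- A's loop is an `any` over the bases
theorem pvLoopA_eq_any (name : List Char) (l : List (List Char)) :
    pvLoopA name l = l.any (fun b =>
      name == b
      || PySem.Chars.endswith name (['_', '_'] ++ b)
      || PySem.Chars.endswith name ([':'] ++ b)
      || PySem.Chars.endswith name (['/'] ++ b)
      || PySem.Chars.endswith name (['.'] ++ b)) := by
  induction l with
  | nil => rfl
  | cons b rest ih => rw [pvLoopA, List.any_cons, ih]

-- the per-separator test of B's loop is an `any` over the bases
theorem pvMatch_eq_any (sep n : List Char) :
    (match pvLastTail sep n with
     | some t => pvBases.contains t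
     | none => false) = pvBases.any (fun b => pvLastTail sep n == some b) := by
  cases h : pvLastTail sep n with
  | none => simp [pvBases]
  | some t =>
    apply Bool.eq_iff_iff.mpr
    rw [List.contains_iff_mem]
    simp only [List.any_eq_true, beq_iff_eq, Option.some.injEq]
    constructor
    · intro h; exact ⟨t, h, rfl⟩
    · rintro ⟨b, hb, h⟩; subst h; exact hb

-- the core equality, for an arbitrary name
theorem core_eq (n : List Char) :
    pvLoopA n pvBases = (if pvBases.contains n then true else pvLoopB n pvSeps) := by
  have a1 : ∀ b ∈ pvBases,
      PySem.Chars.endswith n (['_', '_'] ++ b) = (pvLastTail ['_', '_'] n == some b) := by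
    intro b hb
    apply pvAtom _ _ (by decide)
    simp only [pvBases, List.mem_cons, List.not_mem_nil, or_false] at hb
    rcases hb with rfl | rfl | rfl | rfl | rfl | rfl | rfl | rfl <;> decide
  have a2 : ∀ b ∈ pvBases,
      PySem.Chars.endswith n ([':'] ++ b) = (pvLastTail [':'] n == some b) := by
    intro b hb
    apply pvAtom _ _ (by decide)
    simp only [pvBases, List.mem_cons, List.not_mem_nil, or_false] at hb
    rcases hb with rfl | rfl | rfl | rfl | rfl | rfl | rfl | rfl <;> decide
  have a3 : ∀ b ∈ pvBases,
      PySem.Chars.endswith n (['/'] ++ b) = (pvLastTail ['/'] n == some b) := by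
    intro b hb
    apply pvAtom _ _ (by decide)
    simp only [pvBases, List.mem_cons, List.not_mem_nil, or_false] at hb
    rcases hb with rfl | rfl | rfl | rfl | rfl | rfl | rfl | rfl <;> decide
  have a4 : ∀ b ∈ pvBases,
      PySem.Chars.endswith n (['.'] ++ b) = (pvLastTail ['.'] n == some b) := by
    intro b hb
    apply pvAtom _ _ (by decide)
    simp only [pvBases, List.mem_cons, List.not_mem_nil, or_false] at hb
    rcases hb with rfl | rfl | rfl | rfl | rfl | rfl | rfl | rfl <;> decide
  rw [pvLoopA_eq_any,
      pvAnyCongr pvBases _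
        (fun b => (((n == b || (pvLastTail ['_','_'] n == some b))
          || (pvLastTail [':'] n == some b))
          || (pvLastTail ['/'] n == some b))
          || (pvLastTail ['.'] n == some b))
        (by intro b hb; rw [a1 b hb, a2 b hb, a3 b hb, a4 b hb]),
      pvAnyOr, pvAnyOr, pvAnyOr, pvAnyOr]
  simp only [pvSeps, pvLoopB, pvMatch_eq_any, Bool.or_false, Bool.if_true_left]
  have hc : pvBases.any (fun b => n == b) = pvBases.contains n := by
    apply Bool.eq_iff_iff.mpr
    simp [List.any_eq_true]
  rw [hc]
  simp [Bool.or_assoc]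

-- ===== VERDICT (by name: the statement is the Claim_ definition above) =====
theorem is_dynamic_mcp_management_tool_py_spec : Claim_equal_is_dynamic_mcp_management_tool_py := by
  intro tool_name _
  unfold Spec_is_dynamic_mcp_management_tool_py
  unfold is_dynamic_mcp_management_tool_py is_dynamic_mcp_management_tool_py_alt
  set n := PySem.Chars.lower (if tool_name == "" then "" else tool_name).toList with hn
  by_cases h : n = []
  · simp [h]
  · simp only [beq_iff_eq, if_neg h]
    exact core_eq n
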